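-- pv_equiv track=rewrite | github.com/taymurfa/reddit-mohs-nlp | backend/main.py | infer_recovery_label
-- ===== SOURCE A (Python) =====
-- RECOVERY_TOPIC_LABELS = {
--     "Ointments and dressings": {"petrolatum_ointment", "dressings_bandages", "moist_wound_care", "wound_coverage"},
--     "Scar care and sun protection": {"silicone_scar_therapy", "sun_protection", "scar_massage", "cosmetic_camouflage"},
--     "Cleaning and wound care": {"cleansing", "moist_wound_care", "dressings_bandages"},
--     "Pain, swelling, and bleeding": {"pain_control", "swelling_ice_elevation", "bleeding_pressure", "numbing_lidocaine"},
--     "Stitches and reconstruction": {"stitch_care", "reconstruction_repair", "graft_flap_care"},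
--     "Antibiotics and infection concerns": {"infection_warning", "antibiotic_ointment", "call_clinic"},
--     "Activity and recovery restrictions": {"activity_restriction", "sleep_rest_positioning"},
-- }
--
-- def infer_recovery_label(keywords: list[str]) -> str:
--     scores: dict[str, int] = {}
--     for label, terms in RECOVERY_TOPIC_LABELS.items():
--         score = 0
--         for rank, keyword in enumerate(keywords[:8]):
--             keyword_parts = set(keyword.split("_"))
--             if keyword in terms:
--                 score += 12 if rank == 0 else 6 if rank == 1 else 3
--             score += len(keyword_parts & terms)
--         scores[label] = score
--     label, score = max(scores.items(), key=lambda item: item[1])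
--     if score > 0:
--         return label
--     return "Management/recovery advice"
-- ===== SOURCE B (Python) =====
-- LABELS = (
--     "Ointments and dressings",
--     "Scar care and sun protection",
--     "Cleaning and wound care",
--     "Pain, swelling, and bleeding",
--     "Stitches and reconstruction",
--     "Antibiotics and infection concerns",
--     "Activity and recovery restrictions",
-- )
--
-- # Precomputed inverted index: term -> labels whose term-set contains it (labels in dict order).
-- TERM_TO_LABELS = {
--     "activity_restriction": ("Activity and recovery restrictions",),
--     "antibiotic_ointment": ("Antibiotics and infection concerns",),
--     "bleeding_pressure": ("Pain, swelling, and bleeding",),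
--     "call_clinic": ("Antibiotics and infection concerns",),
--     "cleansing": ("Cleaning and wound care",),
--     "cosmetic_camouflage": ("Scar care and sun protection",),
--     "dressings_bandages": ("Ointments and dressings", "Cleaning and wound care"),
--     "graft_flap_care": ("Stitches and reconstruction",),
--     "infection_warning": ("Antibiotics and infection concerns",),
--     "moist_wound_care": ("Ointments and dressings", "Cleaning and wound care"),
--     "numbing_lidocaine": ("Pain, swelling, and bleeding",),
--     "pain_control": ("Pain, swelling, and bleeding",),
--     "petrolatum_ointment": ("Ointments and dressings",),
--     "reconstruction_repair": ("Stitches and reconstruction",),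
--     "scar_massage": ("Scar care and sun protection",),
--     "silicone_scar_therapy": ("Scar care and sun protection",),
--     "sleep_rest_positioning": ("Activity and recovery restrictions",),
--     "stitch_care": ("Stitches and reconstruction",),
--     "sun_protection": ("Scar care and sun protection",),
--     "swelling_ice_elevation": ("Pain, swelling, and bleeding",),
--     "wound_coverage": ("Ointments and dressings",),
-- }
--
--
-- def infer_recovery_label(keywords: list[str]) -> str:
--     scores: dict[str, int] = {label: 0 for label in LABELS}
--     for rank, keyword in enumerate(keywords[:8]):
--         bonus = 12 if rank == 0 else 6 if rank == 1 else 3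
--         for label in TERM_TO_LABELS.get(keyword, ()):
--             scores[label] += bonus
--         for part in set(keyword.split("_")):
--             for label in TERM_TO_LABELS.get(part, ()):
--                 scores[label] += 1
--     best_label, best_score = max(scores.items(), key=lambda kv: kv[1])
--     if best_score > 0:
--         return best_label
--     return "Management/recovery advice"
-- ===== Notes on version B (the rewrite author's own statement) =====
-- stated objective: alternative
-- what changed: B replaces A's nested scan (for each of the 7 labels, re-walk the keywords and intersect part-sets with the term set) by a single pass over the keywords that consults a precomputed inverted index term->labels and accumulates all 7 label scores at once.
import Mathlib
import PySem

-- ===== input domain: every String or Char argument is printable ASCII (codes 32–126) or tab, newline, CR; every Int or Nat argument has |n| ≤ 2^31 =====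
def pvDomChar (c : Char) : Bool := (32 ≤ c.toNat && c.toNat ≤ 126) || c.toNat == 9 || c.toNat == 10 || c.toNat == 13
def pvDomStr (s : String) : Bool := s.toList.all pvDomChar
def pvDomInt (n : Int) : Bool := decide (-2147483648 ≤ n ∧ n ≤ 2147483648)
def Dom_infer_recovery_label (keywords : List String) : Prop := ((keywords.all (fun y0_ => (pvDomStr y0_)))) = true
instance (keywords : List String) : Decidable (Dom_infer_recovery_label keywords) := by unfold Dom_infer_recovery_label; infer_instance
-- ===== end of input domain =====

-- B replaces A's 7×keywords nested membership/intersection scans by one pass over the keywords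
-- with a precomputed inverted index term → labels (objective: alternative; same observable behaviour).

-- ===== PORT A =====
-- RECOVERY_TOPIC_LABELS: the module constant; each Python set of terms is represented as a list of
-- its distinct elements (A uses the sets only for membership and intersection size, so order is irrelevant).
def pvT1 : List String := ["dressings_bandages", "moist_wound_care", "petrolatum_ointment", "wound_coverage"]
def pvT2 : List String := ["cosmetic_camouflage", "scar_massage", "silicone_scar_therapy", "sun_protection"]
def pvT3 : List String := ["cleansing", "dressings_bandages", "moist_wound_care"]
def pvT4 : List String := ["bleeding_pressure", "numbing_lidocaine", "pain_control", "swelling_ice_elevation"]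
def pvT5 : List String := ["graft_flap_care", "reconstruction_repair", "stitch_care"]
def pvT6 : List String := ["antibiotic_ointment", "call_clinic", "infection_warning"]
def pvT7 : List String := ["activity_restriction", "sleep_rest_positioning"]
def pvLabels : List (String × List String) := [
  ("Ointments and dressings", pvT1),
  ("Scar care and sun protection", pvT2),
  ("Cleaning and wound care", pvT3),
  ("Pain, swelling, and bleeding", pvT4),
  ("Stitches and reconstruction", pvT5),
  ("Antibiotics and infection concerns", pvT6),
  ("Activity and recovery restrictions", pvT7)]

-- the inner 'for rank, keyword in enumerate(keywords[:8])' scoring loop of A, one label's term set at a time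
def pvStepA (terms : List String) (score : Int) (rk : Int × String) : Int :=
  -- keyword_parts = set(keyword.split("_")); split? is none only for an empty separator
  let keyword_parts : PySem.Set String := PySem.Set.ofList ((PySem.Str.split? rk.2 "_").getD [])
  let score : Int := if rk.2 ∈ terms then
      score + (if rk.1 = 0 then 12 else if rk.1 = 1 then 6 else 3) else score
  score + PySem.Set.len (PySem.Set.inter keyword_parts terms)

def pvScore (terms : List String) (E : List (Int × String)) : Int := E.foldl (pvStepA terms) 0

-- the shared final lines: max(scores.items(), key=...) and the score > 0 test
def pvFinal (scores : PySem.Dict String Int) : String :=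
  match PySem.List.max? scores.items (fun item => item.2) with
  | some ls => if ls.2 > 0 then ls.1 else "Management/recovery advice"
  | none => "Management/recovery advice"  -- unreachable: scores always has the 7 labels

def infer_recovery_label (keywords : List String) : String :=
  let scores : PySem.Dict String Int :=
    pvLabels.foldl (fun scores lt =>
        scores.insert lt.1 (pvScore lt.2 (PySem.List.enumerate (PySem.List.slice keywords none (some 8)) 0)))
      PySem.Dict.empty
  pvFinal scores

-- ===== PORT B =====
-- LABELS: Source B's tuple of the seven labels, in RECOVERY_TOPIC_LABELS order.
def pvLabelNames : List String := ["Ointments and dressings", "Scar care and sun protection", "Cleaning and wound care", "Pain, swelling, and bleeding", "Stitches and reconstruction", "Antibiotics and infection concerns", "Activity and recovery restrictions"]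
-- TERM_TO_LABELS: the precomputed inverted index from Source B (a module-level literal dict).
def pvTTL : PySem.Dict String (List String) := PySem.Dict.ofList [
  ("activity_restriction", ["Activity and recovery restrictions"]),
  ("antibiotic_ointment", ["Antibiotics and infection concerns"]),
  ("bleeding_pressure", ["Pain, swelling, and bleeding"]),
  ("call_clinic", ["Antibiotics and infection concerns"]),
  ("cleansing", ["Cleaning and wound care"]),
  ("cosmetic_camouflage", ["Scar care and sun protection"]),
  ("dressings_bandages", ["Ointments and dressings", "Cleaning and wound care"]),
  ("graft_flap_care", ["Stitches and reconstruction"]),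
  ("infection_warning", ["Antibiotics and infection concerns"]),
  ("moist_wound_care", ["Ointments and dressings", "Cleaning and wound care"]),
  ("numbing_lidocaine", ["Pain, swelling, and bleeding"]),
  ("pain_control", ["Pain, swelling, and bleeding"]),
  ("petrolatum_ointment", ["Ointments and dressings"]),
  ("reconstruction_repair", ["Stitches and reconstruction"]),
  ("scar_massage", ["Scar care and sun protection"]),
  ("silicone_scar_therapy", ["Scar care and sun protection"]),
  ("sleep_rest_positioning", ["Activity and recovery restrictions"]),
  ("stitch_care", ["Stitches and reconstruction"]),
  ("sun_protection", ["Scar care and sun protection"]),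
  ("swelling_ice_elevation", ["Pain, swelling, and bleeding"]),
  ("wound_coverage", ["Ointments and dressings"])]

-- B's body for one enumerated keyword (rank, keyword)
def pvStepB (scores : PySem.Dict String Int) (rk : Int × String) : PySem.Dict String Int :=
  let bonus : Int := if rk.1 = 0 then 12 else if rk.1 = 1 then 6 else 3
  -- scores[label] += bonus: the label key is always present, so modify with default 0 is exact
  let scores := (pvTTL.getD rk.2 []).foldl (fun sc l => sc.modify l 0 (· + bonus)) scores
  -- for part in set(keyword.split("_")): all updates are additions, so set-iteration order cannot matter
  (PySem.Set.ofList ((PySem.Str.split? rk.2 "_").getD [])).foldl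
    (fun sc p => (pvTTL.getD p []).foldl (fun sc l => sc.modify l 0 (· + 1)) sc) scores

def infer_recovery_label_alt (keywords : List String) : String :=
  -- scores = {label: 0 for label in LABELS}
  let scores : PySem.Dict String Int := PySem.Dict.ofList (pvLabelNames.map (fun l => (l, (0 : Int))))
  let scores := (PySem.List.enumerate (PySem.List.slice keywords none (some 8)) 0).foldl pvStepB scores
  pvFinal scores

-- ===== PRECONDITION & SPEC =====
def Spec_infer_recovery_label (keywords : List String) (out : String) : Prop := out = infer_recovery_label_alt keywords
instance (keywords : List String) (out : String) : Decidable (Spec_infer_recovery_label keywords out) := by unfold Spec_infer_recovery_label; infer_instance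

-- ===== CLAIM (what is proved, stated in full; the proofs are below) =====
def Claim_equal_infer_recovery_label : Prop := ∀ (keywords : List String), Dom_infer_recovery_label keywords → Spec_infer_recovery_label keywords (infer_recovery_label keywords)

-- ===== LEMMAS AND PROOFS =====
-- The score dict of either port always has exactly the 7 labels, in RECOVERY_TOPIC_LABELS order:
def pvD7 (v1 v2 v3 v4 v5 v6 v7 : Int) : PySem.Dict String Int :=
  PySem.Dict.mk [
    ("Ointments and dressings", v1),
    ("Scar care and sun protection", v2),
    ("Cleaning and wound care", v3),
    ("Pain, swelling, and bleeding", v4),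
    ("Stitches and reconstruction", v5),
    ("Antibiotics and infection concerns", v6),
    ("Activity and recovery restrictions", v7)]

-- the 22 keys of pvTTL
def pvKeys22 : List String := ["activity_restriction", "antibiotic_ointment", "bleeding_pressure", "call_clinic", "cleansing", "cosmetic_camouflage", "dressings_bandages", "graft_flap_care", "infection_warning", "moist_wound_care", "numbing_lidocaine", "pain_control", "petrolatum_ointment", "reconstruction_repair", "scar_massage", "silicone_scar_therapy", "sleep_rest_positioning", "stitch_care", "sun_protection", "swelling_ice_elevation", "wound_coverage"]

lemma pvD7_congr {a1 a2 a3 a4 a5 a6 a7 b1 b2 b3 b4 b5 b6 b7 : Int}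
    (h1 : a1 = b1) (h2 : a2 = b2) (h3 : a3 = b3) (h4 : a4 = b4) (h5 : a5 = b5)
    (h6 : a6 = b6) (h7 : a7 = b7) :
    pvD7 a1 a2 a3 a4 a5 a6 a7 = pvD7 b1 b2 b3 b4 b5 b6 b7 := by
  rw [h1, h2, h3, h4, h5, h6, h7]

-- one inner 'for label in TERM_TO_LABELS.get(p, ())' loop adds c to exactly the labels whose term set contains p
lemma pv_bump (p : String) (c : Int) (v1 v2 v3 v4 v5 v6 v7 : Int) :
    (pvTTL.getD p []).foldl (fun sc l => sc.modify l 0 (· + c)) (pvD7 v1 v2 v3 v4 v5 v6 v7)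
    = pvD7 (if p ∈ pvT1 then v1 + c else v1) (if p ∈ pvT2 then v2 + c else v2) (if p ∈ pvT3 then v3 + c else v3) (if p ∈ pvT4 then v4 + c else v4) (if p ∈ pvT5 then v5 + c else v5) (if p ∈ pvT6 then v6 + c else v6) (if p ∈ pvT7 then v7 + c else v7) := by
  by_cases hp : p ∈ pvKeys22
  · simp only [pvKeys22, List.mem_cons, List.not_mem_nil, or_false] at hp
    rcases hp with rfl|rfl|rfl|rfl|rfl|rfl|rfl|rfl|rfl|rfl|rfl|rfl|rfl|rfl|rfl|rfl|rfl|rfl|rfl|rfl|rfl|rfl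
    all_goals rfl
  · have hkeys : pvTTL.keys = pvKeys22 := rfl
    have hc : pvTTL.contains p = false := by
      rw [PySem.Dict.contains_eq_decide_mem_keys, hkeys]; simpa using hp
    rw [PySem.Dict.getD_of_not_contains pvTTL ([] : List String) hc]
    have m1 : p ∉ pvT1 := fun h => hp ((by decide : ∀ t ∈ pvT1, t ∈ pvKeys22) p h)
    have m2 : p ∉ pvT2 := fun h => hp ((by decide : ∀ t ∈ pvT2, t ∈ pvKeys22) p h)
    have m3 : p ∉ pvT3 := fun h => hp ((by decide : ∀ t ∈ pvT3, t ∈ pvKeys22) p h)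
    have m4 : p ∉ pvT4 := fun h => hp ((by decide : ∀ t ∈ pvT4, t ∈ pvKeys22) p h)
    have m5 : p ∉ pvT5 := fun h => hp ((by decide : ∀ t ∈ pvT5, t ∈ pvKeys22) p h)
    have m6 : p ∉ pvT6 := fun h => hp ((by decide : ∀ t ∈ pvT6, t ∈ pvKeys22) p h)
    have m7 : p ∉ pvT7 := fun h => hp ((by decide : ∀ t ∈ pvT7, t ∈ pvKeys22) p h)
    rw [if_neg m1, if_neg m2, if_neg m3, if_neg m4, if_neg m5, if_neg m6, if_neg m7]
    rfl

lemma pv_interLen (S ts : List String) :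
    PySem.Set.len (PySem.Set.inter S ts) = ((S.countP fun p => decide (p ∈ ts) : Nat) : Int) := by
  simp [PySem.Set.len, PySem.Set.inter, List.countP_eq_length_filter]

-- processing one part list adds 1 to each label whose terms contain the part; over a whole list of parts
lemma pv_fold_parts (ps : List String) (v1 v2 v3 v4 v5 v6 v7 : Int) :
    ps.foldl (fun sc p => (pvTTL.getD p []).foldl (fun sc l => sc.modify l 0 (· + 1)) sc)
      (pvD7 v1 v2 v3 v4 v5 v6 v7)
    = pvD7 (v1 + ((ps.countP fun p => decide (p ∈ pvT1) : Nat) : Int)) (v2 + ((ps.countP fun p => decide (p ∈ pvT2) : Nat) : Int)) (v3 + ((ps.countP fun p => decide (p ∈ pvT3) : Nat) : Int)) (v4 + ((ps.countP fun p => decide (p ∈ pvT4) : Nat) : Int)) (v5 + ((ps.countP fun p => decide (p ∈ pvT5) : Nat) : Int)) (v6 + ((ps.countP fun p => decide (p ∈ pvT6) : Nat) : Int)) (v7 + ((ps.countP fun p => decide (p ∈ pvT7) : Nat) : Int)) := by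
  induction ps generalizing v1 v2 v3 v4 v5 v6 v7 with
  | nil => exact (pvD7_congr (by simp) (by simp) (by simp) (by simp) (by simp) (by simp) (by simp)).symm
  | cons p ps ih =>
    rw [List.foldl_cons, pv_bump p 1, ih]
    exact pvD7_congr (by by_cases h : p ∈ pvT1 <;> simp [h] <;> ring) (by by_cases h : p ∈ pvT2 <;> simp [h] <;> ring) (by by_cases h : p ∈ pvT3 <;> simp [h] <;> ring) (by by_cases h : p ∈ pvT4 <;> simp [h] <;> ring) (by by_cases h : p ∈ pvT5 <;> simp [h] <;> ring) (by by_cases h : p ∈ pvT6 <;> simp [h] <;> ring) (by by_cases h : p ∈ pvT7 <;> simp [h] <;> ring)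

-- adding to the accumulator commutes with A's scoring step
lemma pv_stepA_add (ts : List String) (s t : Int) (rk : Int × String) :
    pvStepA ts (s + t) rk = s + pvStepA ts t rk := by
  simp only [pvStepA]
  split_ifs <;> ring

lemma pv_score_shift (ts : List String) (E : List (Int × String)) (s : Int) :
    E.foldl (pvStepA ts) s = s + pvScore ts E := by
  induction E generalizing s with
  | nil => simp [pvScore]
  | cons rk E ih =>
    rw [List.foldl_cons, ih (pvStepA ts s rk),
        show pvStepA ts s rk = s + pvStepA ts 0 rk from by simpa using pv_stepA_add ts s 0 rk]
    have h2 : pvScore ts (rk :: E) = pvStepA ts 0 rk + pvScore ts E := by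
      simp only [pvScore, List.foldl_cons]
      exact ih (pvStepA ts 0 rk)
    rw [h2]; ring

lemma pv_score_cons (ts : List String) (rk : Int × String) (E : List (Int × String)) :
    pvScore ts (rk :: E) = pvStepA ts 0 rk + pvScore ts E := by
  simp only [pvScore, List.foldl_cons]
  exact pv_score_shift ts E (pvStepA ts 0 rk)

lemma pv_stepB_eq (rk : Int × String) (v1 v2 v3 v4 v5 v6 v7 : Int) :
    pvStepB (pvD7 v1 v2 v3 v4 v5 v6 v7) rk
    = pvD7 (v1 + pvStepA pvT1 0 rk) (v2 + pvStepA pvT2 0 rk) (v3 + pvStepA pvT3 0 rk) (v4 + pvStepA pvT4 0 rk) (v5 + pvStepA pvT5 0 rk) (v6 + pvStepA pvT6 0 rk) (v7 + pvStepA pvT7 0 rk) := by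
  show (PySem.Set.ofList ((PySem.Str.split? rk.2 "_").getD [])).foldl
      (fun sc p => (pvTTL.getD p []).foldl (fun sc l => sc.modify l 0 (· + 1)) sc)
      ((pvTTL.getD rk.2 []).foldl
        (fun sc l => sc.modify l 0 (· + (if rk.1 = 0 then 12 else if rk.1 = 1 then 6 else 3)))
        (pvD7 v1 v2 v3 v4 v5 v6 v7)) = _
  rw [pv_bump, pv_fold_parts]
  exact pvD7_congr (by simp only [pvStepA, pv_interLen]; split_ifs <;> push_cast <;> ring) (by simp only [pvStepA, pv_interLen]; split_ifs <;> push_cast <;> ring) (by simp only [pvStepA, pv_interLen]; split_ifs <;> push_cast <;> ring) (by simp only [pvStepA, pv_interLen]; split_ifs <;> push_cast <;> ring) (by simp only [pvStepA, pv_interLen]; split_ifs <;> push_cast <;> ring) (by simp only [pvStepA, pv_interLen]; split_ifs <;> push_cast <;> ring) (by simp only [pvStepA, pv_interLen]; split_ifs <;> push_cast <;> ring)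

lemma pv_fold_E (E : List (Int × String)) (v1 v2 v3 v4 v5 v6 v7 : Int) :
    E.foldl pvStepB (pvD7 v1 v2 v3 v4 v5 v6 v7)
    = pvD7 (v1 + pvScore pvT1 E) (v2 + pvScore pvT2 E) (v3 + pvScore pvT3 E) (v4 + pvScore pvT4 E) (v5 + pvScore pvT5 E) (v6 + pvScore pvT6 E) (v7 + pvScore pvT7 E) := by
  induction E generalizing v1 v2 v3 v4 v5 v6 v7 with
  | nil => exact (pvD7_congr (by simp [pvScore]) (by simp [pvScore]) (by simp [pvScore]) (by simp [pvScore]) (by simp [pvScore]) (by simp [pvScore]) (by simp [pvScore])).symm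
  | cons rk E ih =>
    rw [List.foldl_cons, pv_stepB_eq, ih]
    exact pvD7_congr (by rw [pv_score_cons]; ring) (by rw [pv_score_cons]; ring) (by rw [pv_score_cons]; ring) (by rw [pv_score_cons]; ring) (by rw [pv_score_cons]; ring) (by rw [pv_score_cons]; ring) (by rw [pv_score_cons]; ring)

-- ===== VERDICT (by name: the statement is the Claim_ definition above) =====
theorem infer_recovery_label_spec : Claim_equal_infer_recovery_label := by
  intro keywords _
  show infer_recovery_label keywords = infer_recovery_label_alt keywords
  show pvFinal (pvLabels.foldl (fun scores lt =>
        scores.insert lt.1 (pvScore lt.2 (PySem.List.enumerate (PySem.List.slice keywords none (some 8)) 0)))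
      PySem.Dict.empty)
    = pvFinal ((PySem.List.enumerate (PySem.List.slice keywords none (some 8)) 0).foldl pvStepB
        (PySem.Dict.ofList (pvLabelNames.map (fun l => (l, (0 : Int))))))
  have hA : pvLabels.foldl (fun scores lt =>
        scores.insert lt.1 (pvScore lt.2 (PySem.List.enumerate (PySem.List.slice keywords none (some 8)) 0)))
      PySem.Dict.empty
      = pvD7 (pvScore pvT1 (PySem.List.enumerate (PySem.List.slice keywords none (some 8)) 0)) (pvScore pvT2 (PySem.List.enumerate (PySem.List.slice keywords none (some 8)) 0)) (pvScore pvT3 (PySem.List.enumerate (PySem.List.slice keywords none (some 8)) 0)) (pvScore pvT4 (PySem.List.enumerate (PySem.List.slice keywords none (some 8)) 0)) (pvScore pvT5 (PySem.List.enumerate (PySem.List.slice keywords none (some 8)) 0)) (pvScore pvT6 (PySem.List.enumerate (PySem.List.slice keywords none (some 8)) 0)) (pvScore pvT7 (PySem.List.enumerate (PySem.List.slice keywords none (some 8)) 0)) := rfl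
  have hB0 : PySem.Dict.ofList (pvLabelNames.map (fun l => (l, (0 : Int)))) = pvD7 0 0 0 0 0 0 0 := rfl
  rw [hA, hB0, pv_fold_E]
  exact congrArg pvFinal (pvD7_congr (zero_add _).symm (zero_add _).symm (zero_add _).symm (zero_add _).symm (zero_add _).symm (zero_add _).symm (zero_add _).symm)
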